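-- pv_equiv track=rewrite | github.com/SternerLab/Authority | authority/validation/metrics.py | unpack
-- ===== SOURCE A (Python) =====
-- import itertools
--
-- def unpack(clusters, reference_clusters):
--     # Calculate pairwise true/false positives/negatives
--     article_count = sum(len(c) for c in clusters)
--     all_ids       = list(set().union(e for c in reference_clusters for e in c))
--     tp = 0
--     tn = 0
--     fp = 0
--     fn = 0
--     s = 0
--     for i, j in itertools.combinations(all_ids, r=2):
--         label = False
--         for ref_cluster in reference_clusters:
--             if i in ref_cluster and j in ref_cluster:
--                 label = True
--                 break
--         for cluster in clusters:
--             prediction = i in cluster and j in cluster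
--             if prediction:
--                 if label:
--                     tp += 1
--                 else:
--                     fp += 1
--                 s += 1
--                 break
--         else:
--             if label:
--                 fn += 1
--             else:
--                 tn += 1
--             s += 1
--     assert tp + tn + fp + fn == s, f'Sanity check on confusion matrix FAILED: {tp} + {tn} + {fp} + {fn} != {s}'
--     return tp, tn, fp, fn
-- ===== SOURCE B (Python) =====
-- def unpack(clusters, reference_clusters):
--     # Pair-set formulation: count co-membership pairs directly per cluster
--     # instead of scanning every cluster for every pair of ids.
--     ref_ids = {e for c in reference_clusters for e in c}
--
--     def copairs(cluster_list):
--         out = set()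
--         for c in cluster_list:
--             elems = sorted({x for x in c if x in ref_ids})
--             for k in range(len(elems)):
--                 for b in elems[k + 1:]:
--                     out.add((elems[k], b))
--         return out
--
--     ref_pairs = copairs(reference_clusters)
--     pred_pairs = copairs(clusters)
--     tp = len(ref_pairs & pred_pairs)
--     fp = len(pred_pairs - ref_pairs)
--     fn = len(ref_pairs - pred_pairs)
--     m = len(ref_ids)
--     tn = m * (m - 1) // 2 - tp - fp - fn
--     return tp, tn, fp, fn
-- ===== Notes on version B (the rewrite author's own statement) =====
-- stated objective: faster
-- what changed: Instead of scanning every reference and predicted cluster for each of the O(m^2) id pairs, B builds the sets of co-membership pairs once per clustering (restricted to reference ids) and reads tp/fp/fn off set intersections/differences, with tn obtained arithmetically as C(m,2) minus the rest.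
import Mathlib
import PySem

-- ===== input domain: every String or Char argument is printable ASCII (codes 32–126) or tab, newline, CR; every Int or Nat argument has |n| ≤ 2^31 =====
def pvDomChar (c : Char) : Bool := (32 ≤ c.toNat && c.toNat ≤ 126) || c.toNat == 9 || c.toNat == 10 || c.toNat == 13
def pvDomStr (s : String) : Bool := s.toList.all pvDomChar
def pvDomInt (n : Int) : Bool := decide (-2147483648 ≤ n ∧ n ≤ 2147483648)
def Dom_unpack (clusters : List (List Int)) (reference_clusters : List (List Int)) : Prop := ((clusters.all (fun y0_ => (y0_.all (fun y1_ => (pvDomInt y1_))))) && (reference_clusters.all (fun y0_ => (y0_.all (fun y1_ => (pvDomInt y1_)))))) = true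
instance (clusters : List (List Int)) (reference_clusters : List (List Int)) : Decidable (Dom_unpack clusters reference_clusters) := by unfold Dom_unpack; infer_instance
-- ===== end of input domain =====

-- B replaces A's scan of every cluster for each of the O(m^2) id pairs by co-membership
-- pair sets built once per clustering; the final assert of A always holds, so A is total.
-- A iterates over a Python set (via itertools.combinations); the result is a count and so
-- does not depend on that iteration order — the port uses first-insertion order.

-- ===== PORT A =====
-- 'for ref_cluster in reference_clusters: if i in rc and j in rc: label=True; break'
def pvLabel (i j : Int) : List (List Int) → Bool
  | [] => false
  | rc :: rest => if rc.contains i && rc.contains j then true else pvLabel i j rest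

-- 'for cluster in clusters: ... break / else' — true iff the loop broke
def pvPred (i j : Int) : List (List Int) → Bool
  | [] => false
  | c :: rest => if c.contains i && c.contains j then true else pvPred i j rest

def unpack (clusters : List (List Int)) (reference_clusters : List (List Int)) : Int × Int × Int × Int :=
  let _article_count : Int := (clusters.map (fun c => (c.length : Int))).sum
  let all_ids : List Int := PySem.Set.ofList (reference_clusters.flatMap (fun c => c))
  let st : Int × Int × Int × Int × Int :=
    (PySem.List.combinations all_ids 2).foldl (fun st pr =>
      match pr with
      | [i, j] =>
        let label := pvLabel i j reference_clusters
        if pvPred i j clusters then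
          (if label then (st.1 + 1, st.2.1, st.2.2.1, st.2.2.2.1, st.2.2.2.2 + 1)
           else (st.1, st.2.1, st.2.2.1 + 1, st.2.2.2.1, st.2.2.2.2 + 1))
        else
          (if label then (st.1, st.2.1, st.2.2.1, st.2.2.2.1 + 1, st.2.2.2.2 + 1)
           else (st.1, st.2.1 + 1, st.2.2.1, st.2.2.2.1, st.2.2.2.2 + 1))
      | _ => st) (0, 0, 0, 0, 0)
  -- the assert 'tp + tn + fp + fn == s' always holds (each iteration bumps one counter and s)
  (st.1, st.2.1, st.2.2.1, st.2.2.2.1)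

-- ===== PORT B =====
-- 'for k in range(len(elems)): for b in elems[k+1:]: out.add((elems[k], b))'
def pvPairsOf : List Int → List (Int × Int)
  | [] => []
  | x :: xs => xs.map (fun b => (x, b)) ++ pvPairsOf xs

def pvCopairs (refIds : List Int) (clusterList : List (List Int)) : PySem.Set (Int × Int) :=
  clusterList.foldl (fun out c =>
    PySem.Set.update out
      (pvPairsOf (PySem.List.sorted (PySem.Set.ofList (c.filter (fun x => refIds.contains x))) (fun x => x) false)))
    PySem.Set.empty

def unpack_alt (clusters : List (List Int)) (reference_clusters : List (List Int)) : Int × Int × Int × Int :=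
  let refIds : PySem.Set Int := PySem.Set.ofList (reference_clusters.flatMap (fun c => c))
  let refPairs := pvCopairs refIds reference_clusters
  let predPairs := pvCopairs refIds clusters
  let tp : Int := (PySem.Set.inter refPairs predPairs).length
  let fp : Int := (PySem.Set.diff predPairs refPairs).length
  let fn : Int := (PySem.Set.diff refPairs predPairs).length
  let m : Int := refIds.length
  let tn : Int := PySem.Int.floordiv (m * (m - 1)) 2 - tp - fp - fn
  (tp, tn, fp, fn)

-- ===== PRECONDITION & SPEC =====
def Spec_unpack (clusters : List (List Int)) (reference_clusters : List (List Int)) (out : Int × Int × Int × Int) : Prop := out = unpack_alt clusters reference_clusters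
instance (clusters : List (List Int)) (reference_clusters : List (List Int)) (out : Int × Int × Int × Int) : Decidable (Spec_unpack clusters reference_clusters out) := by unfold Spec_unpack; infer_instance

-- ===== CLAIM (what is proved, stated in full; the proofs are below) =====
def Claim_equal_unpack : Prop := ∀ (clusters : List (List Int)) (reference_clusters : List (List Int)), Dom_unpack clusters reference_clusters → Spec_unpack clusters reference_clusters (unpack clusters reference_clusters)

-- ===== LEMMAS AND PROOFS =====

-- normalize an unordered pair
def pvNp (p : Int × Int) : Int × Int := if p.1 < p.2 then p else (p.2, p.1)

theorem pvNp_eval (a b : Int) : pvNp (a, b) = if a < b then (a, b) else (b, a) := rfl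

theorem pvNp_comp_cases (p : Int × Int) : pvNp p = p ∨ pvNp p = (p.2, p.1) := by
  unfold pvNp; split <;> simp

theorem pvLabel_eq_any (i j : Int) (l : List (List Int)) :
    pvLabel i j l = l.any (fun rc => rc.contains i && rc.contains j) := by
  induction l with
  | nil => rfl
  | cons c rest ih => by_cases h : (c.contains i && c.contains j) = true <;>
      simp [pvLabel, h, ih]

theorem pvPred_eq_any (i j : Int) (l : List (List Int)) :
    pvPred i j l = l.any (fun c => c.contains i && c.contains j) := by
  induction l with
  | nil => rfl
  | cons c rest ih => by_cases h : (c.contains i && c.contains j) = true <;>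
      simp [pvPred, h, ih]

theorem pvPairsOf_comp_mem {l : List Int} {p : Int × Int} (h : p ∈ pvPairsOf l) :
    p.1 ∈ l ∧ p.2 ∈ l := by
  induction l with
  | nil => simp [pvPairsOf] at h
  | cons x xs ih =>
    simp only [pvPairsOf, List.mem_append, List.mem_map] at h
    rcases h with ⟨b, hb, rfl⟩ | h
    · exact ⟨by simp, by simp [hb]⟩
    · exact ⟨List.mem_cons_of_mem _ (ih h).1, List.mem_cons_of_mem _ (ih h).2⟩

theorem mem_map_np_pairsOf {R : List Int} (hR : R.Nodup) (a b : Int) :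
    (a, b) ∈ (pvPairsOf R).map pvNp ↔ a < b ∧ a ∈ R ∧ b ∈ R := by
  induction R with
  | nil => simp [pvPairsOf]
  | cons x xs ih =>
    have hx : x ∉ xs := (List.nodup_cons.mp hR).1
    have ihx := ih (List.nodup_cons.mp hR).2
    simp only [pvPairsOf, List.map_append, List.mem_append, List.map_map, List.mem_map,
      Function.comp, List.mem_cons]
    simp only [List.mem_map] at ihx
    constructor
    · intro h
      rcases h with ⟨c, hc, he⟩ | h
      · have hcx : c ≠ x := fun h => hx (h ▸ hc)
        rw [pvNp_eval] at he
        split_ifs at he with hlt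
        · obtain ⟨rfl, rfl⟩ := Prod.mk.inj he
          exact ⟨hlt, Or.inl rfl, Or.inr hc⟩
        · obtain ⟨rfl, rfl⟩ := Prod.mk.inj he
          exact ⟨lt_of_le_of_ne (not_lt.mp hlt) hcx, Or.inr hc, Or.inl rfl⟩
      · have := ihx.mp h
        exact ⟨this.1, Or.inr this.2.1, Or.inr this.2.2⟩
    · rintro ⟨hlt, h1, h2⟩
      rcases h1 with rfl | m1
      · rcases h2 with rfl | m2
        · exact absurd hlt (lt_irrefl _)
        · exact Or.inl ⟨b, m2, by rw [pvNp_eval, if_pos hlt]⟩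
      · rcases h2 with rfl | m2
        · exact Or.inl ⟨a, m1, by rw [pvNp_eval, if_neg (not_lt.mpr (le_of_lt hlt))]⟩
        · exact Or.inr (ihx.mpr ⟨hlt, m1, m2⟩)

theorem nodup_map_np_pairsOf {R : List Int} (hR : R.Nodup) :
    ((pvPairsOf R).map pvNp).Nodup := by
  induction R with
  | nil => simp [pvPairsOf]
  | cons x xs ih =>
    have hx : x ∉ xs := (List.nodup_cons.mp hR).1
    have hxs := (List.nodup_cons.mp hR).2
    rw [pvPairsOf, List.map_append, List.nodup_append]
    refine ⟨?_, ih hxs, ?_⟩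
    · rw [List.map_map]
      refine List.Nodup.map_on ?_ hxs
      intro c hc d hd hcd
      have hcx : c ≠ x := fun h => hx (h ▸ hc)
      have hdx : d ≠ x := fun h => hx (h ▸ hd)
      simp only [Function.comp_apply, pvNp_eval] at hcd
      split_ifs at hcd <;> [skip; skip; skip; skip] <;>
        · have := Prod.mk.inj hcd; omega
    · intro p hp q hq
      rcases List.mem_map.mp hp with ⟨⟨u, v⟩, huv, rfl⟩
      rcases List.mem_map.mp huv with ⟨c, hc, hce⟩
      rcases List.mem_map.mp hq with ⟨r, hr, rfl⟩
      have hcomp := pvPairsOf_comp_mem hr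
      intro he
      have h1 : (pvNp r).1 ∈ xs ∧ (pvNp r).2 ∈ xs := by
        rcases pvNp_comp_cases r with h | h
        · rw [h]; exact ⟨hcomp.1, hcomp.2⟩
        · rw [h]; exact ⟨hcomp.2, hcomp.1⟩
      have huvx : u = x ∨ v = x := Or.inl (Prod.mk.inj hce).1.symm
      have huv2 : (pvNp (u, v)).1 ∈ xs ∧ (pvNp (u, v)).2 ∈ xs := he ▸ h1
      have hxin : x ∈ xs := by
        rcases pvNp_comp_cases (u, v) with h | h <;> rw [h] at huv2 <;>
          rcases huvx with rfl | rfl <;> simp at huv2 <;> tauto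
      exact hx hxin

-- proof-side abbreviations
def pvR (refs : List (List Int)) : List Int := PySem.Set.ofList (refs.flatMap (fun c => c))
def pvLA (refs : List (List Int)) : List (Int × Int) := (pvPairsOf (pvR refs)).map pvNp
def pvPb (cls : List (List Int)) (p : Int × Int) : Bool := cls.any (fun c => c.contains p.1 && c.contains p.2)

theorem pvPb_np (cls : List (List Int)) (p : Int × Int) : pvPb cls (pvNp p) = pvPb cls p := by
  unfold pvPb pvNp
  split
  · rfl
  · simp only []
    congr 1
    funext c
    exact Bool.and_comm _ _

theorem combinations_two (R : List Int) :
    PySem.List.combinations R 2 = (pvPairsOf R).map (fun p => [p.1, p.2]) := by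
  induction R with
  | nil => rfl
  | cons x xs ih =>
    rw [show (2 : Nat) = 1 + 1 from rfl] at *
    rw [PySem.List.combinations_cons_succ, PySem.List.combinations_one, ih, pvPairsOf,
      List.map_append, List.map_map, List.map_map]
    rfl

theorem countP_map_np (q : Int × Int → Bool) (hq : ∀ p, q (pvNp p) = q p) (l : List (Int × Int)) :
    (l.map pvNp).countP q = l.countP q := by
  rw [List.countP_map]
  exact List.countP_congr (fun p _ => by simp [Function.comp, hq])

theorem countP_partition (l : List (Int × Int)) (P L : Int × Int → Bool) :
    l.countP (fun p => P p && L p) + l.countP (fun p => P p && !L p)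
      + l.countP (fun p => !P p && L p) + l.countP (fun p => !P p && !L p) = l.length := by
  induction l with
  | nil => rfl
  | cons p l ih =>
    cases hP : P p <;> cases hL : L p <;>
      simp [List.countP_cons, hP, hL] <;> omega

theorem two_mul_length_pairsOf (R : List Int) :
    2 * (pvPairsOf R).length = R.length * (R.length - 1) := by
  induction R with
  | nil => rfl
  | cons x xs ih =>
    have key : (xs.length + 1) * (xs.length + 1 - 1) = xs.length * (xs.length - 1) + 2 * xs.length := by
      cases xs.length with
      | zero => rfl
      | succ m => simp [Nat.succ_sub_one]; ring
    simp only [pvPairsOf, List.length_append, List.length_map, List.length_cons]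
    omega

theorem length_eq_of_nodup_mem_iff {u v : List (Int × Int)} (hu : u.Nodup) (hv : v.Nodup)
    (h : ∀ x, x ∈ u ↔ x ∈ v) : u.length = v.length :=
  ((List.perm_ext_iff_of_nodup hu hv).mpr h).length_eq

def pvElems (refIds : List Int) (c : List Int) : List Int :=
  PySem.List.sorted (PySem.Set.ofList (c.filter (fun x => refIds.contains x))) (fun x => x) false

theorem pvCopairs_eq (r : List Int) (cl : List (List Int)) :
    pvCopairs r cl = cl.foldl (fun out c => PySem.Set.update out (pvPairsOf (pvElems r c))) PySem.Set.empty := rfl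

theorem pvElems_pairwise (r c : List Int) : (pvElems r c).Pairwise (· < ·) :=
  PySem.List.sorted_ofList_pairwise_lt _

theorem pvElems_nodup (r c : List Int) : (pvElems r c).Nodup :=
  (pvElems_pairwise r c).imp ne_of_lt

theorem pvElems_mem (r c : List Int) (x : Int) : x ∈ pvElems r c ↔ x ∈ c ∧ x ∈ r := by
  simp [pvElems, PySem.List.mem_sorted, PySem.Set.mem_ofList, List.mem_filter]

theorem pairsOf_lt_of_pairwise {l : List Int} (h : l.Pairwise (· < ·)) :
    ∀ p ∈ pvPairsOf l, p.1 < p.2 := by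
  induction l with
  | nil => intro p hp; simp [pvPairsOf] at hp
  | cons x xs ih =>
    intro p hp
    rcases List.pairwise_cons.mp h with ⟨hx, hxs⟩
    simp only [pvPairsOf, List.mem_append, List.mem_map] at hp
    rcases hp with ⟨b, hb, rfl⟩ | hp
    · exact hx b hb
    · exact ih hxs p hp

theorem map_np_pairsOf_of_sorted {l : List Int} (h : l.Pairwise (· < ·)) :
    (pvPairsOf l).map pvNp = pvPairsOf l := by
  have hid : ∀ p ∈ pvPairsOf l, pvNp p = p := fun p hp => by
    unfold pvNp; rw [if_pos (pairsOf_lt_of_pairwise h p hp)]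
  exact (List.map_congr_left fun p hp => (hid p hp).trans rfl).trans (List.map_id _)

theorem mem_pairsFrom (r c : List Int) (a b : Int) :
    (a, b) ∈ pvPairsOf (pvElems r c) ↔ a < b ∧ (a ∈ c ∧ a ∈ r) ∧ (b ∈ c ∧ b ∈ r) := by
  rw [← map_np_pairsOf_of_sorted (pvElems_pairwise r c),
    mem_map_np_pairsOf (pvElems_nodup r c), pvElems_mem, pvElems_mem]

theorem nodup_foldl_update (f : List Int → List (Int × Int)) (cl : List (List Int))
    (s : PySem.Set (Int × Int)) (hs : s.Nodup) :
    (cl.foldl (fun out c => PySem.Set.update out (f c)) s).Nodup := by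
  induction cl generalizing s with
  | nil => exact hs
  | cons c cl ih => exact ih _ (PySem.Set.nodup_update _ _ hs)

theorem mem_foldl_update (f : List Int → List (Int × Int)) (cl : List (List Int))
    (s : PySem.Set (Int × Int)) (p : Int × Int) :
    p ∈ cl.foldl (fun out c => PySem.Set.update out (f c)) s ↔ p ∈ s ∨ ∃ c ∈ cl, p ∈ f c := by
  induction cl generalizing s with
  | nil => simp
  | cons c cl ih =>
    simp only [List.foldl_cons, ih, PySem.Set.mem_update, List.mem_cons]
    constructor
    · rintro ((h | h) | ⟨d, hd, hp⟩)
      · exact Or.inl h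
      · exact Or.inr ⟨c, Or.inl rfl, h⟩
      · exact Or.inr ⟨d, Or.inr hd, hp⟩
    · rintro (h | ⟨d, (rfl | hd), hp⟩)
      · exact Or.inl (Or.inl h)
      · exact Or.inl (Or.inr hp)
      · exact Or.inr ⟨d, hd, hp⟩

theorem nodup_copairs (r : List Int) (cl : List (List Int)) : (pvCopairs r cl).Nodup := by
  rw [pvCopairs_eq]
  exact nodup_foldl_update _ _ _ List.nodup_nil

theorem mem_copairs (r : List Int) (cl : List (List Int)) (p : Int × Int) :
    p ∈ pvCopairs r cl ↔ ∃ c ∈ cl, p ∈ pvPairsOf (pvElems r c) := by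
  rw [pvCopairs_eq, mem_foldl_update]
  simp [PySem.Set.empty]

theorem mem_pvR (refs : List (List Int)) (x : Int) :
    x ∈ pvR refs ↔ ∃ c ∈ refs, x ∈ c := by
  simp [pvR, PySem.Set.mem_ofList, List.mem_flatMap]

theorem pvPb_iff (cls : List (List Int)) (a b : Int) :
    pvPb cls (a, b) = true ↔ ∃ c ∈ cls, a ∈ c ∧ b ∈ c := by
  simp [pvPb]

theorem mem_refPairs (refs : List (List Int)) (a b : Int) :
    (a, b) ∈ pvCopairs (pvR refs) refs ↔ a < b ∧ pvPb refs (a, b) = true := by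
  rw [mem_copairs, pvPb_iff]
  constructor
  · rintro ⟨c, hc, hp⟩
    rcases (mem_pairsFrom _ _ _ _).mp hp with ⟨hlt, ⟨ha, _⟩, ⟨hb, _⟩⟩
    exact ⟨hlt, c, hc, ha, hb⟩
  · rintro ⟨hlt, c, hc, ha, hb⟩
    exact ⟨c, hc, (mem_pairsFrom _ _ _ _).mpr
      ⟨hlt, ⟨ha, (mem_pvR refs a).mpr ⟨c, hc, ha⟩⟩, ⟨hb, (mem_pvR refs b).mpr ⟨c, hc, hb⟩⟩⟩⟩

theorem mem_predPairs (cls refs : List (List Int)) (a b : Int) :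
    (a, b) ∈ pvCopairs (pvR refs) cls ↔
      a < b ∧ a ∈ pvR refs ∧ b ∈ pvR refs ∧ pvPb cls (a, b) = true := by
  rw [mem_copairs, pvPb_iff]
  constructor
  · rintro ⟨c, hc, hp⟩
    rcases (mem_pairsFrom _ _ _ _).mp hp with ⟨hlt, ⟨ha, har⟩, ⟨hb, hbr⟩⟩
    exact ⟨hlt, har, hbr, c, hc, ha, hb⟩
  · rintro ⟨hlt, har, hbr, c, hc, ha, hb⟩
    exact ⟨c, hc, (mem_pairsFrom _ _ _ _).mpr ⟨hlt, ⟨ha, har⟩, ⟨hb, hbr⟩⟩⟩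

theorem nodup_pvLA (refs : List (List Int)) : (pvLA refs).Nodup :=
  nodup_map_np_pairsOf (PySem.Set.nodup_ofList _)

theorem mem_pvLA (refs : List (List Int)) (a b : Int) :
    (a, b) ∈ pvLA refs ↔ a < b ∧ a ∈ pvR refs ∧ b ∈ pvR refs :=
  mem_map_np_pairsOf (PySem.Set.nodup_ofList _) a b

theorem fold_eval (cls refs : List (List Int)) (prs : List (Int × Int)) (a b c d e : Int) :
    prs.foldl (fun st p =>
        let label := pvLabel p.1 p.2 refs
        if pvPred p.1 p.2 cls then
          (if label then (st.1 + 1, st.2.1, st.2.2.1, st.2.2.2.1, st.2.2.2.2 + 1)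
           else (st.1, st.2.1, st.2.2.1 + 1, st.2.2.2.1, st.2.2.2.2 + 1))
        else
          (if label then (st.1, st.2.1, st.2.2.1, st.2.2.2.1 + 1, st.2.2.2.2 + 1)
           else (st.1, st.2.1 + 1, st.2.2.1, st.2.2.2.1, st.2.2.2.2 + 1)))
      (a, b, c, d, e)
    = (a + (prs.countP (fun p => pvPb cls p && pvPb refs p) : Int),
       b + (prs.countP (fun p => !pvPb cls p && !pvPb refs p) : Int),
       c + (prs.countP (fun p => pvPb cls p && !pvPb refs p) : Int),
       d + (prs.countP (fun p => !pvPb cls p && pvPb refs p) : Int),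
       e + (prs.length : Int)) := by
  induction prs generalizing a b c d e with
  | nil => simp
  | cons p l ih =>
    have hl : pvLabel p.1 p.2 refs = pvPb refs p := pvLabel_eq_any p.1 p.2 refs
    have hp : pvPred p.1 p.2 cls = pvPb cls p := pvPred_eq_any p.1 p.2 cls
    simp only [List.foldl_cons, List.countP_cons, List.length_cons, hl, hp]
    cases hP : pvPb cls p <;> cases hL : pvPb refs p <;>
      simp only [hP, hL, Bool.not_true, Bool.not_false, Bool.true_and, Bool.false_and,
        Bool.and_true, Bool.and_false, if_true, if_false, decide_true, decide_false,
        cond_true, cond_false, Bool.true_and] <;>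
      rw [ih] <;> push_cast <;> ring_nf

theorem pvPb_mem_R (refs : List (List Int)) (a b : Int) (h : pvPb refs (a, b) = true) :
    a ∈ pvR refs ∧ b ∈ pvR refs := by
  rcases (pvPb_iff refs a b).mp h with ⟨c, hc, ha, hb⟩
  exact ⟨(mem_pvR refs a).mpr ⟨c, hc, ha⟩, (mem_pvR refs b).mpr ⟨c, hc, hb⟩⟩

theorem tp_count (cls refs : List (List Int)) :
    (PySem.Set.inter (pvCopairs (pvR refs) refs) (pvCopairs (pvR refs) cls)).length
      = (pvLA refs).countP (fun p => pvPb cls p && pvPb refs p) := by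
  rw [List.countP_eq_length_filter]
  refine length_eq_of_nodup_mem_iff (PySem.Set.nodup_inter _ _ (nodup_copairs _ _))
    ((nodup_pvLA refs).filter _) ?_
  rintro ⟨a, b⟩
  rw [PySem.Set.mem_inter, mem_refPairs, mem_predPairs, List.mem_filter, mem_pvLA]
  simp only [Bool.and_eq_true]
  constructor
  · rintro ⟨⟨hlt, hL⟩, ⟨_, ha, hb, hP⟩⟩
    exact ⟨⟨hlt, ha, hb⟩, hP, hL⟩
  · rintro ⟨⟨hlt, ha, hb⟩, hP, hL⟩
    exact ⟨⟨hlt, hL⟩, hlt, ha, hb, hP⟩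

theorem fp_count (cls refs : List (List Int)) :
    (PySem.Set.diff (pvCopairs (pvR refs) cls) (pvCopairs (pvR refs) refs)).length
      = (pvLA refs).countP (fun p => pvPb cls p && !pvPb refs p) := by
  rw [List.countP_eq_length_filter]
  refine length_eq_of_nodup_mem_iff (PySem.Set.nodup_diff _ _ (nodup_copairs _ _))
    ((nodup_pvLA refs).filter _) ?_
  rintro ⟨a, b⟩
  rw [PySem.Set.mem_diff, mem_refPairs, mem_predPairs, List.mem_filter, mem_pvLA]
  simp only [Bool.and_eq_true, Bool.not_eq_true']
  constructor
  · rintro ⟨⟨hlt, ha, hb, hP⟩, hnr⟩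
    refine ⟨⟨hlt, ha, hb⟩, hP, ?_⟩
    by_contra hL
    exact hnr ⟨hlt, Bool.not_eq_false _ ▸ (by revert hL; cases pvPb refs (a, b) <;> simp)⟩
  · rintro ⟨⟨hlt, ha, hb⟩, hP, hL⟩
    exact ⟨⟨hlt, ha, hb, hP⟩, fun h => by rw [h.2] at hL; cases hL⟩

theorem fn_count (cls refs : List (List Int)) :
    (PySem.Set.diff (pvCopairs (pvR refs) refs) (pvCopairs (pvR refs) cls)).length
      = (pvLA refs).countP (fun p => !pvPb cls p && pvPb refs p) := by
  rw [List.countP_eq_length_filter]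
  refine length_eq_of_nodup_mem_iff (PySem.Set.nodup_diff _ _ (nodup_copairs _ _))
    ((nodup_pvLA refs).filter _) ?_
  rintro ⟨a, b⟩
  rw [PySem.Set.mem_diff, mem_refPairs, mem_predPairs, List.mem_filter, mem_pvLA]
  simp only [Bool.and_eq_true, Bool.not_eq_true']
  constructor
  · rintro ⟨⟨hlt, hL⟩, hnp⟩
    rcases pvPb_mem_R refs a b hL with ⟨ha, hb⟩
    refine ⟨⟨hlt, ha, hb⟩, ?_, hL⟩
    by_contra hP
    exact hnp ⟨hlt, ha, hb, by revert hP; cases pvPb cls (a, b) <;> simp⟩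
  · rintro ⟨⟨hlt, ha, hb⟩, hP, hL⟩
    exact ⟨⟨hlt, hL⟩, fun h => by rw [h.2.2.2] at hP; cases hP⟩

theorem A_eval (cls refs : List (List Int)) :
    unpack cls refs =
      (((pvPairsOf (pvR refs)).countP (fun p => pvPb cls p && pvPb refs p) : Int),
       ((pvPairsOf (pvR refs)).countP (fun p => !pvPb cls p && !pvPb refs p) : Int),
       ((pvPairsOf (pvR refs)).countP (fun p => pvPb cls p && !pvPb refs p) : Int),
       ((pvPairsOf (pvR refs)).countP (fun p => !pvPb cls p && pvPb refs p) : Int)) := by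
  unfold unpack
  simp only [combinations_two, List.foldl_map]
  exact (congrArg (fun st : Int × Int × Int × Int × Int => (st.1, st.2.1, st.2.2.1, st.2.2.2.1))
    (fold_eval cls refs (pvPairsOf (pvR refs)) 0 0 0 0 0)).trans (by norm_num)

theorem B_eval (cls refs : List (List Int)) :
    unpack_alt cls refs =
      (((pvLA refs).countP (fun p => pvPb cls p && pvPb refs p) : Int),
       PySem.Int.floordiv ((((pvR refs).length : Int)) * (((pvR refs).length : Int) - 1)) 2
         - ((pvLA refs).countP (fun p => pvPb cls p && pvPb refs p) : Int)
         - ((pvLA refs).countP (fun p => pvPb cls p && !pvPb refs p) : Int)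
         - ((pvLA refs).countP (fun p => !pvPb cls p && pvPb refs p) : Int),
       ((pvLA refs).countP (fun p => pvPb cls p && !pvPb refs p) : Int),
       ((pvLA refs).countP (fun p => !pvPb cls p && pvPb refs p) : Int)) := by
  unfold unpack_alt
  dsimp only
  rw [show PySem.Set.ofList (refs.flatMap (fun c => c)) = pvR refs from rfl]
  rw [tp_count, fp_count, fn_count]

-- ===== VERDICT (by name: the statement is the Claim_ definition above) =====
theorem unpack_spec : Claim_equal_unpack := by
  intro cls refs _
  unfold Spec_unpack
  rw [A_eval, B_eval]
  have hnp : ∀ q : Int × Int → Bool, (∀ p, q (pvNp p) = q p) →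
      (pvLA refs).countP q = (pvPairsOf (pvR refs)).countP q := fun q hq => countP_map_np q hq _
  have e1 := hnp (fun p => pvPb cls p && pvPb refs p) (fun p => by simp [pvPb_np])
  have e2 := hnp (fun p => pvPb cls p && !pvPb refs p) (fun p => by simp [pvPb_np])
  have e3 := hnp (fun p => !pvPb cls p && pvPb refs p) (fun p => by simp [pvPb_np])
  rw [e1, e2, e3]
  refine Prod.ext rfl (Prod.ext ?_ rfl)
  have hpart := countP_partition (pvPairsOf (pvR refs)) (fun p => pvPb cls p) (fun p => pvPb refs p)
  have hlen := two_mul_length_pairsOf (pvR refs)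
  have hcast : ((pvR refs).length : Int) * (((pvR refs).length : Int) - 1)
      = (((pvR refs).length * ((pvR refs).length - 1) : Nat) : Int) := by
    cases h : (pvR refs).length with
    | zero => simp
    | succ m => push_cast [Nat.succ_sub_one]; ring
  rw [PySem.Int.floordiv_eq_ediv_of_pos (by norm_num), hcast]
  generalize (pvR refs).length * ((pvR refs).length - 1) = N at hlen ⊢
  dsimp only at hpart ⊢
  omega
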